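-- pv_equiv track=rewrite | github.com/IDK-Silver/chat-agent | src/chat_agent/reviewer/pre_reviewer.py | _is_allowed_memory_path
-- ===== SOURCE A (Python) =====
-- _ALLOWED_MEMORY_ROOTS = [
--     "memory/short-term.md",
--     "memory/people/",
--     "memory/agent/index.md",
--     "memory/agent/persona.md",
--     "memory/agent/config.md",
--     "memory/agent/protocol.md",
--     "memory/agent/inner-state.md",
--     "memory/agent/pending-thoughts.md",
--     "memory/agent/knowledge/",
--     "memory/agent/thoughts/",
--     "memory/agent/experiences/",
--     "memory/agent/skills/",
--     "memory/agent/interests/",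
--     "memory/agent/journal/",
-- ]
--
-- def _is_allowed_memory_path(path: str) -> bool:
--     """Check if path falls under configured memory roots."""
--     for root in _ALLOWED_MEMORY_ROOTS:
--         if root.endswith("/"):
--             if path.startswith(root):
--                 return True
--         elif path == root:
--             return True
--     return False
-- ===== SOURCE B (Python) =====
-- def _is_allowed_memory_path(path: str) -> bool:
--     """Check if path falls under configured memory roots.
--
--     Segment-dispatch: split the path at its '/' separators and branch on the
--     segments, instead of scanning a list of root strings.
--     """
--     head, sep, rest = path.partition("/")
--     if head != "memory" or not sep:
--         return False
--     if rest == "short-term.md":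
--         return True
--     seg, sep2, rest2 = rest.partition("/")
--     if seg == "people":
--         return bool(sep2)
--     if seg != "agent" or not sep2:
--         return False
--     if rest2 in ("index.md", "persona.md", "config.md", "protocol.md",
--                  "inner-state.md", "pending-thoughts.md"):
--         return True
--     seg3, sep3, _ = rest2.partition("/")
--     return bool(sep3) and seg3 in ("knowledge", "thoughts", "experiences",
--                                    "skills", "interests", "journal")
-- ===== Notes on version B (the rewrite author's own statement) =====
-- stated objective: alternative
-- what changed: B replaces A's scan over the list of 14 root strings by a segment-dispatch decision tree: it splits the path at its '/' separators with str.partition and branches on the successive segments ('memory', then 'people'/'agent', then the file or directory name), so no root list is traversed at all.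
import Mathlib
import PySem

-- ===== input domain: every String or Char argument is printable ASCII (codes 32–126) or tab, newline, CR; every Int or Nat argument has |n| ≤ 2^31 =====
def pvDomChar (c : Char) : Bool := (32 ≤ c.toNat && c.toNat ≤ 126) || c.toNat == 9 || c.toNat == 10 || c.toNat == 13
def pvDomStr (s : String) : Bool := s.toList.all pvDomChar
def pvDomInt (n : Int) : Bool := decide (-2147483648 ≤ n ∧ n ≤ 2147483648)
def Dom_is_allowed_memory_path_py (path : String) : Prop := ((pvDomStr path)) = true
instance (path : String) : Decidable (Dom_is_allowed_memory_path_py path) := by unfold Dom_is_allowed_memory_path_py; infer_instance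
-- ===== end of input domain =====

-- B replaces A's scan over the root list by a segment-dispatch decision tree that
-- partitions the path at '/' and branches on the segments (alternative algorithm; same results).

-- ===== PORT A =====
def pvAllowedMemoryRoots : List String := [
  "memory/short-term.md",
  "memory/people/",
  "memory/agent/index.md",
  "memory/agent/persona.md",
  "memory/agent/config.md",
  "memory/agent/protocol.md",
  "memory/agent/inner-state.md",
  "memory/agent/pending-thoughts.md",
  "memory/agent/knowledge/",
  "memory/agent/thoughts/",
  "memory/agent/experiences/",
  "memory/agent/skills/",
  "memory/agent/interests/",
  "memory/agent/journal/"]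

-- A's for-loop with early return, as structural recursion over the roots list
def pvLoopA (path : String) : List String → Bool
  | [] => false
  | root :: rest =>
      if PySem.Str.endswith root "/" then
        if PySem.Str.startswith path root then true else pvLoopA path rest
      else if path == root then true
      else pvLoopA path rest

def is_allowed_memory_path_py (path : String) : Bool := pvLoopA path pvAllowedMemoryRoots

-- ===== PORT B =====
-- str.partition("/") ported by hand over List Char (exact: first occurrence of '/';
-- the separator component is modelled as the Bool "separator found", which is exactly
-- how Source B uses it via `bool(sep)`)
def pvPartitionSlash : List Char → List Char × Bool × List Char
  | [] => ([], false, [])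
  | c :: cs =>
      if c = '/' then ([], true, cs)
      else (c :: (pvPartitionSlash cs).1, (pvPartitionSlash cs).2.1, (pvPartitionSlash cs).2.2)

def pvAgentFiles : List (List Char) :=
  ["index.md".toList, "persona.md".toList, "config.md".toList, "protocol.md".toList,
   "inner-state.md".toList, "pending-thoughts.md".toList]

def pvAgentDirs : List (List Char) :=
  ["knowledge".toList, "thoughts".toList, "experiences".toList,
   "skills".toList, "interests".toList, "journal".toList]

def is_allowed_memory_path_py_alt (path : String) : Bool :=
  let p1 := pvPartitionSlash path.toList          -- head, sep, rest = path.partition("/")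
  if !(p1.1 == "memory".toList) || !p1.2.1 then false
  else if p1.2.2 == "short-term.md".toList then true
  else
    let p2 := pvPartitionSlash p1.2.2             -- seg, sep2, rest2 = rest.partition("/")
    if p2.1 == "people".toList then p2.2.1
    else if !(p2.1 == "agent".toList) || !p2.2.1 then false
    else if pvAgentFiles.contains p2.2.2 then true
    else
      let p3 := pvPartitionSlash p2.2.2           -- seg3, sep3, _ = rest2.partition("/")
      p3.2.1 && pvAgentDirs.contains p3.1

-- ===== PRECONDITION & SPEC =====
def Spec_is_allowed_memory_path_py (path : String) (out : Bool) : Prop := out = is_allowed_memory_path_py_alt path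
instance (path : String) (out : Bool) : Decidable (Spec_is_allowed_memory_path_py path out) := by unfold Spec_is_allowed_memory_path_py; infer_instance

-- ===== CLAIM (what is proved, stated in full; the proofs are below) =====
def Claim_equal_is_allowed_memory_path_py : Prop := ∀ (path : String), Dom_is_allowed_memory_path_py path → Spec_is_allowed_memory_path_py path (is_allowed_memory_path_py path)

-- ===== LEMMAS AND PROOFS =====

-- partition characterises a literal-prefix test: s starts with lit ++ '/' ++ t
-- iff partition finds the separator right after lit and t prefixes the remainder
theorem pvPart_prefix (lit t s : List Char) (h : '/' ∉ lit) :
    (lit ++ '/' :: t) <+: s ↔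
      ((pvPartitionSlash s).1 = lit ∧ (pvPartitionSlash s).2.1 = true ∧ t <+: (pvPartitionSlash s).2.2) := by
  induction s generalizing lit with
  | nil =>
      cases lit <;> simp [pvPartitionSlash]
  | cons c cs ih =>
      cases lit with
      | nil =>
          by_cases hc : c = '/'
          · simp [pvPartitionSlash, hc, List.cons_prefix_cons]
          · simp [pvPartitionSlash, hc, List.cons_prefix_cons]
            exact fun h' => absurd h'.symm hc
      | cons x xs =>
          have hx : x ≠ '/' := fun he => h (he ▸ List.mem_cons_self)
          have hxs : '/' ∉ xs := fun hm => h (List.mem_cons_of_mem _ hm)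
          by_cases hc : c = '/'
          · subst hc
            simp [pvPartitionSlash, List.cons_prefix_cons]
            intro h'
            exact absurd h' hx
          · simp [pvPartitionSlash, hc, List.cons_prefix_cons, ih xs hxs, and_assoc,
                  eq_comm (a := c) (b := x)]

-- partition characterises a literal equality test: s = lit ++ '/' ++ t
theorem pvPart_eq (lit t s : List Char) (h : '/' ∉ lit) :
    s = lit ++ '/' :: t ↔
      ((pvPartitionSlash s).1 = lit ∧ (pvPartitionSlash s).2.1 = true ∧ (pvPartitionSlash s).2.2 = t) := by
  induction s generalizing lit with
  | nil =>
      cases lit <;> simp [pvPartitionSlash]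
  | cons c cs ih =>
      cases lit with
      | nil =>
          by_cases hc : c = '/' <;> simp [pvPartitionSlash, hc]
      | cons x xs =>
          have hx : x ≠ '/' := fun he => h (he ▸ List.mem_cons_self)
          have hxs : '/' ∉ xs := fun hm => h (List.mem_cons_of_mem _ hm)
          by_cases hc : c = '/'
          · subst hc
            simp [pvPartitionSlash]
            intro h'
            exact absurd h'.symm hx
          · simp [pvPartitionSlash, hc, ih xs hxs, and_assoc, eq_comm (a := c) (b := x)]

-- common characterisation of both programs, in terms of the partition of the path
def pvMid (l : List Char) : Prop :=
  (pvPartitionSlash l).1 = "memory".toList ∧ (pvPartitionSlash l).2.1 = true ∧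
    ((pvPartitionSlash l).2.2 = "short-term.md".toList ∨
      ((pvPartitionSlash (pvPartitionSlash l).2.2).1 = "people".toList ∧
       (pvPartitionSlash (pvPartitionSlash l).2.2).2.1 = true) ∨
      ((pvPartitionSlash (pvPartitionSlash l).2.2).1 = "agent".toList ∧
       (pvPartitionSlash (pvPartitionSlash l).2.2).2.1 = true ∧
        ((pvPartitionSlash (pvPartitionSlash l).2.2).2.2 ∈ pvAgentFiles ∨
          ((pvPartitionSlash (pvPartitionSlash (pvPartitionSlash l).2.2).2.2).2.1 = true ∧
           (pvPartitionSlash (pvPartitionSlash (pvPartitionSlash l).2.2).2.2).1 ∈ pvAgentDirs))))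

set_option maxHeartbeats 2000000 in
theorem pvA_iff (path : String) : is_allowed_memory_path_py path = true ↔ pvMid path.toList := by
  unfold is_allowed_memory_path_py pvAllowedMemoryRoots
  simp only [pvLoopA,
    (by decide : PySem.Str.endswith "memory/short-term.md" "/" = false),
    (by decide : PySem.Str.endswith "memory/people/" "/" = true),
    (by decide : PySem.Str.endswith "memory/agent/index.md" "/" = false),
    (by decide : PySem.Str.endswith "memory/agent/persona.md" "/" = false),
    (by decide : PySem.Str.endswith "memory/agent/config.md" "/" = false),
    (by decide : PySem.Str.endswith "memory/agent/protocol.md" "/" = false),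
    (by decide : PySem.Str.endswith "memory/agent/inner-state.md" "/" = false),
    (by decide : PySem.Str.endswith "memory/agent/pending-thoughts.md" "/" = false),
    (by decide : PySem.Str.endswith "memory/agent/knowledge/" "/" = true),
    (by decide : PySem.Str.endswith "memory/agent/thoughts/" "/" = true),
    (by decide : PySem.Str.endswith "memory/agent/experiences/" "/" = true),
    (by decide : PySem.Str.endswith "memory/agent/skills/" "/" = true),
    (by decide : PySem.Str.endswith "memory/agent/interests/" "/" = true),
    (by decide : PySem.Str.endswith "memory/agent/journal/" "/" = true),
    Bool.false_eq_true, if_false, if_true, Bool.if_true_left]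
  have Pm := fun t s => pvPart_eq "memory".toList t s (by decide)
  have Pa := fun t s => pvPart_eq "agent".toList t s (by decide)
  have Qm := fun t s => pvPart_prefix "memory".toList t s (by decide)
  have Qp := fun t s => pvPart_prefix "people".toList t s (by decide)
  have Qa := fun t s => pvPart_prefix "agent".toList t s (by decide)
  have Qd0 := fun t s => pvPart_prefix "knowledge".toList t s (by decide)
  have Qd1 := fun t s => pvPart_prefix "thoughts".toList t s (by decide)
  have Qd2 := fun t s => pvPart_prefix "experiences".toList t s (by decide)
  have Qd3 := fun t s => pvPart_prefix "skills".toList t s (by decide)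
  have Qd4 := fun t s => pvPart_prefix "interests".toList t s (by decide)
  have Qd5 := fun t s => pvPart_prefix "journal".toList t s (by decide)
  simp only [Bool.or_eq_true, decide_eq_true_eq, beq_iff_eq, Bool.false_eq_true, or_false,
    PySem.Str.startswith, PySem.Chars.startswith_iff, ← String.toList_inj,
    (by decide : "memory/short-term.md".toList = "memory".toList ++ '/' :: "short-term.md".toList),
    (by decide : "memory/people/".toList = "memory".toList ++ '/' :: ("people".toList ++ '/' :: ([] : List Char))),
    (by decide : "memory/agent/index.md".toList = "memory".toList ++ '/' :: ("agent".toList ++ '/' :: "index.md".toList)),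
    (by decide : "memory/agent/persona.md".toList = "memory".toList ++ '/' :: ("agent".toList ++ '/' :: "persona.md".toList)),
    (by decide : "memory/agent/config.md".toList = "memory".toList ++ '/' :: ("agent".toList ++ '/' :: "config.md".toList)),
    (by decide : "memory/agent/protocol.md".toList = "memory".toList ++ '/' :: ("agent".toList ++ '/' :: "protocol.md".toList)),
    (by decide : "memory/agent/inner-state.md".toList = "memory".toList ++ '/' :: ("agent".toList ++ '/' :: "inner-state.md".toList)),
    (by decide : "memory/agent/pending-thoughts.md".toList = "memory".toList ++ '/' :: ("agent".toList ++ '/' :: "pending-thoughts.md".toList)),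
    (by decide : "memory/agent/knowledge/".toList = "memory".toList ++ '/' :: ("agent".toList ++ '/' :: ("knowledge".toList ++ '/' :: ([] : List Char)))),
    (by decide : "memory/agent/thoughts/".toList = "memory".toList ++ '/' :: ("agent".toList ++ '/' :: ("thoughts".toList ++ '/' :: ([] : List Char)))),
    (by decide : "memory/agent/experiences/".toList = "memory".toList ++ '/' :: ("agent".toList ++ '/' :: ("experiences".toList ++ '/' :: ([] : List Char)))),
    (by decide : "memory/agent/skills/".toList = "memory".toList ++ '/' :: ("agent".toList ++ '/' :: ("skills".toList ++ '/' :: ([] : List Char)))),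
    (by decide : "memory/agent/interests/".toList = "memory".toList ++ '/' :: ("agent".toList ++ '/' :: ("interests".toList ++ '/' :: ([] : List Char)))),
    (by decide : "memory/agent/journal/".toList = "memory".toList ++ '/' :: ("agent".toList ++ '/' :: ("journal".toList ++ '/' :: ([] : List Char)))),
    Pm, Pa, Qm, Qp, Qa, Qd0, Qd1, Qd2, Qd3, Qd4, Qd5, List.nil_prefix, and_true]
  unfold pvMid pvAgentFiles pvAgentDirs
  simp only [List.mem_cons, List.not_mem_nil, or_false]
  constructor
  · rintro (⟨hm, hs, h⟩|⟨hm, hs, hp, h2⟩|⟨hm, hs, ha, h2, he⟩|⟨hm, hs, ha, h2, he⟩|⟨hm, hs, ha, h2, he⟩|⟨hm, hs, ha, h2, he⟩|⟨hm, hs, ha, h2, he⟩|⟨hm, hs, ha, h2, he⟩|⟨hm, hs, ha, h2, hk, h3⟩|⟨hm, hs, ha, h2, hk, h3⟩|⟨hm, hs, ha, h2, hk, h3⟩|⟨hm, hs, ha, h2, hk, h3⟩|⟨hm, hs, ha, h2, hk, h3⟩|⟨hm, hs, ha, h2, hk, h3⟩)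
    · exact ⟨hm, hs, Or.inl h⟩
    · exact ⟨hm, hs, Or.inr (Or.inl ⟨hp, h2⟩)⟩
    · exact ⟨hm, hs, Or.inr (Or.inr ⟨ha, h2, Or.inl (Or.inl he)⟩)⟩
    · exact ⟨hm, hs, Or.inr (Or.inr ⟨ha, h2, Or.inl (Or.inr (Or.inl he))⟩)⟩
    · exact ⟨hm, hs, Or.inr (Or.inr ⟨ha, h2, Or.inl (Or.inr (Or.inr (Or.inl he)))⟩)⟩
    · exact ⟨hm, hs, Or.inr (Or.inr ⟨ha, h2, Or.inl (Or.inr (Or.inr (Or.inr (Or.inl he))))⟩)⟩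
    · exact ⟨hm, hs, Or.inr (Or.inr ⟨ha, h2, Or.inl (Or.inr (Or.inr (Or.inr (Or.inr (Or.inl he)))))⟩)⟩
    · exact ⟨hm, hs, Or.inr (Or.inr ⟨ha, h2, Or.inl (Or.inr (Or.inr (Or.inr (Or.inr (Or.inr (he))))))⟩)⟩
    · exact ⟨hm, hs, Or.inr (Or.inr ⟨ha, h2, Or.inr ⟨h3, Or.inl hk⟩⟩)⟩
    · exact ⟨hm, hs, Or.inr (Or.inr ⟨ha, h2, Or.inr ⟨h3, Or.inr (Or.inl hk)⟩⟩)⟩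
    · exact ⟨hm, hs, Or.inr (Or.inr ⟨ha, h2, Or.inr ⟨h3, Or.inr (Or.inr (Or.inl hk))⟩⟩)⟩
    · exact ⟨hm, hs, Or.inr (Or.inr ⟨ha, h2, Or.inr ⟨h3, Or.inr (Or.inr (Or.inr (Or.inl hk)))⟩⟩)⟩
    · exact ⟨hm, hs, Or.inr (Or.inr ⟨ha, h2, Or.inr ⟨h3, Or.inr (Or.inr (Or.inr (Or.inr (Or.inl hk))))⟩⟩)⟩
    · exact ⟨hm, hs, Or.inr (Or.inr ⟨ha, h2, Or.inr ⟨h3, Or.inr (Or.inr (Or.inr (Or.inr (Or.inr (hk)))))⟩⟩)⟩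
  · rintro ⟨hm, hs, h | ⟨hp, h2⟩ | ⟨ha, h2, he | ⟨h3, hk⟩⟩⟩
    · exact Or.inl ⟨hm, hs, h⟩
    · exact Or.inr (Or.inl ⟨hm, hs, hp, h2⟩)
    · rcases he with he | he | he | he | he | he
      · exact Or.inr (Or.inr (Or.inl ⟨hm, hs, ha, h2, he⟩))
      · exact Or.inr (Or.inr (Or.inr (Or.inl ⟨hm, hs, ha, h2, he⟩)))
      · exact Or.inr (Or.inr (Or.inr (Or.inr (Or.inl ⟨hm, hs, ha, h2, he⟩))))
      · exact Or.inr (Or.inr (Or.inr (Or.inr (Or.inr (Or.inl ⟨hm, hs, ha, h2, he⟩)))))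
      · exact Or.inr (Or.inr (Or.inr (Or.inr (Or.inr (Or.inr (Or.inl ⟨hm, hs, ha, h2, he⟩))))))
      · exact Or.inr (Or.inr (Or.inr (Or.inr (Or.inr (Or.inr (Or.inr (Or.inl ⟨hm, hs, ha, h2, he⟩)))))))
    · rcases hk with hk | hk | hk | hk | hk | hk
      · exact Or.inr (Or.inr (Or.inr (Or.inr (Or.inr (Or.inr (Or.inr (Or.inr (Or.inl ⟨hm, hs, ha, h2, hk, h3⟩))))))))
      · exact Or.inr (Or.inr (Or.inr (Or.inr (Or.inr (Or.inr (Or.inr (Or.inr (Or.inr (Or.inl ⟨hm, hs, ha, h2, hk, h3⟩)))))))))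
      · exact Or.inr (Or.inr (Or.inr (Or.inr (Or.inr (Or.inr (Or.inr (Or.inr (Or.inr (Or.inr (Or.inl ⟨hm, hs, ha, h2, hk, h3⟩))))))))))
      · exact Or.inr (Or.inr (Or.inr (Or.inr (Or.inr (Or.inr (Or.inr (Or.inr (Or.inr (Or.inr (Or.inr (Or.inl ⟨hm, hs, ha, h2, hk, h3⟩)))))))))))
      · exact Or.inr (Or.inr (Or.inr (Or.inr (Or.inr (Or.inr (Or.inr (Or.inr (Or.inr (Or.inr (Or.inr (Or.inr (Or.inl ⟨hm, hs, ha, h2, hk, h3⟩))))))))))))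
      · exact Or.inr (Or.inr (Or.inr (Or.inr (Or.inr (Or.inr (Or.inr (Or.inr (Or.inr (Or.inr (Or.inr (Or.inr (Or.inr (⟨hm, hs, ha, h2, hk, h3⟩)))))))))))))

theorem pvB_iff (path : String) : is_allowed_memory_path_py_alt path = true ↔ pvMid path.toList := by
  unfold is_allowed_memory_path_py_alt pvMid
  dsimp only []
  have hpa : "people".toList ≠ "agent".toList := by decide
  split_ifs with h1 h2 h3 h4 h5 <;>
    simp_all <;>
    first
      | tauto
      | (intro ha hb
         first
           | (rcases h1 with h | h <;> simp_all)
           | (rcases h4 with h | h <;> simp_all))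

-- ===== VERDICT (by name: the statement is the Claim_ definition above) =====
theorem is_allowed_memory_path_py_spec : Claim_equal_is_allowed_memory_path_py := by
  intro path _
  unfold Spec_is_allowed_memory_path_py
  rw [Bool.eq_iff_iff, pvA_iff, pvB_iff]
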